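-- pv_equiv track=rewrite | github.com/q5438722/intent_formalization | scripts/_archive/run_full_pipeline.py | extract_spec_portion
-- ===== SOURCE A (Python) =====
-- def extract_spec_portion(source_text: str, max_lines: int = 300) -> str:
--     """For large files, extract the most spec-relevant portion."""
--     lines = source_text.split('\n')
--     if len(lines) <= max_lines:
--         return source_text
--
--     # Collect lines with spec keywords + surrounding context
--     spec_keywords = ['requires', 'ensures', 'invariant', 'recommends', 'spec fn',
--                      'proof fn', 'decreases', 'assert', 'open spec', 'closed spec',
--                      'pub proof', 'pub open spec', 'pub closed spec']
--     important_lines = set()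
--     for i, line in enumerate(lines):
--         line_lower = line.lower().strip()
--         if any(kw in line_lower for kw in spec_keywords):
--             # Add context: 5 lines before, 10 lines after
--             for j in range(max(0, i-5), min(len(lines), i+11)):
--                 important_lines.add(j)
--
--     # Also include first 20 lines (imports/declarations) and last 5
--     for i in range(min(20, len(lines))):
--         important_lines.add(i)
--     for i in range(max(0, len(lines)-5), len(lines)):
--         important_lines.add(i)
--
--     selected = sorted(important_lines)
--     if len(selected) > max_lines:
--         selected = selected[:max_lines]
--
--     result_lines = []
--     prev = -2
--     for i in selected:
--         if i > prev + 1: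
--             result_lines.append(f"// ... (lines {prev+2}-{i-1} omitted) ...")
--         result_lines.append(lines[i])
--         prev = i
--
--     return '\n'.join(result_lines)
-- ===== SOURCE B (Python) =====
-- def extract_spec_portion(source_text: str, max_lines: int = 300) -> str:
--     """For large files, extract the most spec-relevant portion."""
--     lines = source_text.split('\n')
--     n = len(lines)
--     if n <= max_lines:
--         return source_text
--
--     spec_keywords = ['requires', 'ensures', 'invariant', 'recommends', 'spec fn',
--                      'proof fn', 'decreases', 'assert', 'open spec', 'closed spec',
--                      'pub proof', 'pub open spec', 'pub closed spec']
--
--     # Half-open intervals of important lines, already sorted by start.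
--     intervals = [(0, min(20, n))]
--     for i, line in enumerate(lines):
--         line_lower = line.lower().strip()
--         if any(kw in line_lower for kw in spec_keywords):
--             intervals.append((max(0, i - 5), min(n, i + 11)))
--     intervals.append((max(0, n - 5), n))
--
--     # Merge overlapping/touching intervals into a disjoint sorted list.
--     merged = []
--     ca, cb = intervals[0]
--     for a, b in intervals[1:]:
--         if a <= cb:
--             if b > cb:
--                 cb = b
--         else:
--             merged.append((ca, cb))
--             ca, cb = a, b
--     merged.append((ca, cb))
--
--     # Flatten to the ascending index sequence and truncate.
--     flat = [i for a, b in merged for i in range(a, b)]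
--     if len(flat) > max_lines:
--         flat = flat[:max_lines]
--
--     # Emit maximal consecutive runs as slices, with omission markers between them.
--     out = []
--     prev_end = -1
--     idx = 0
--     while idx < len(flat):
--         a = flat[idx]
--         j = idx
--         while j + 1 < len(flat) and flat[j + 1] == flat[j] + 1:
--             j += 1
--         b = flat[j] + 1
--         if a > prev_end:
--             out.append(f"// ... (lines {prev_end + 1}-{a - 1} omitted) ...")
--         out.extend(lines[a:b])
--         prev_end = b
--         idx = j + 1
--     return '\n'.join(out)
-- ===== Notes on version B (the rewrite author's own statement) =====
-- stated objective: alternative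
-- what changed: B replaces A's hash-set of indices plus sort with directly collecting start-sorted context intervals, merging overlapping/touching intervals in one linear pass, and emitting each maximal run as a list slice, instead of A's per-index set insertion, sorted(set(...)) and per-index rebuild loop.
import Mathlib
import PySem

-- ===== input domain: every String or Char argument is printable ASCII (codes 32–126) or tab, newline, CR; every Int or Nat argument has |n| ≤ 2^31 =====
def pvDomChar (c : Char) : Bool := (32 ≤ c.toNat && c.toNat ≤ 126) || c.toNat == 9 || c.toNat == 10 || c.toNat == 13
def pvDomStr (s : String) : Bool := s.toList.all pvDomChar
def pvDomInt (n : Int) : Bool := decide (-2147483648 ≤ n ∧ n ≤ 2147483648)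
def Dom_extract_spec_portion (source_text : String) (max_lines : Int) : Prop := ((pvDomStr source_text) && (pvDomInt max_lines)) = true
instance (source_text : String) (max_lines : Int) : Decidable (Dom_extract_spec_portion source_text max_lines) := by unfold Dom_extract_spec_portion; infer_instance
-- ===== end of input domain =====

set_option maxHeartbeats 1000000


-- B replaces A's index-set + sort with sorted interval collection, a linear merge of
-- overlapping/touching intervals, and slice-based run emission (objective: alternative).

def pvSpecKeywords : List String :=
  ["requires", "ensures", "invariant", "recommends", "spec fn",
   "proof fn", "decreases", "assert", "open spec", "closed spec",
   "pub proof", "pub open spec", "pub closed spec"]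

-- ===== PORT A =====
def extract_spec_portion (source_text : String) (max_lines : Int) : String :=
  let lines := (PySem.Str.split? source_text "\n").getD []
  if (lines.length : Int) ≤ max_lines then source_text
  else
    let n : Int := lines.length
    let important : PySem.Set Int :=
      (PySem.List.enumerate lines).foldl (fun s p =>
        if pvSpecKeywords.any (fun kw => PySem.Str.isIn kw (PySem.Str.strip (PySem.Str.lower p.2))) then
          (PySem.List.pyRange (max 0 (p.1 - 5)) (min n (p.1 + 11))).foldl PySem.Set.add s
        else s) PySem.Set.empty
    let important := (PySem.List.pyRange 0 (min 20 n)).foldl PySem.Set.add important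
    let important := (PySem.List.pyRange (max 0 (n - 5)) n).foldl PySem.Set.add important
    let selected := PySem.List.sorted important (fun x => x)
    let selected := if (selected.length : Int) > max_lines then PySem.List.slice selected none (some max_lines) else selected
    let res := selected.foldl (fun (st : List String × Int) i =>
        ((if i > st.2 + 1 then
            st.1 ++ ["// ... (lines " ++ PySem.Int.toStr (st.2 + 2) ++ "-" ++ PySem.Int.toStr (i - 1) ++ " omitted) ..."]
          else st.1) ++ [PySem.List.pyGetD lines i ""], i)) (([] : List String), (-2 : Int))
    PySem.Str.join "\n" res.1

-- ===== PORT B =====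
-- B-side helper: the inner while-loop of Source B — split off the leading consecutive run,
-- returning (one past its last element, the remaining indices).
def pvRunSplit : Int → List Int → Int × List Int
  | j, [] => (j + 1, [])
  | j, x :: xs => if x = j + 1 then pvRunSplit x xs else (j + 1, x :: xs)

theorem pvRunSplit_length_le : ∀ (rest : List Int) (a : Int), (pvRunSplit a rest).2.length ≤ rest.length := by
  intro rest
  induction rest with
  | nil => intro a; simp [pvRunSplit]
  | cons x xs ih =>
    intro a
    simp only [pvRunSplit]
    split
    · exact Nat.le_succ_of_le (ih x)
    · simp

-- B-side helper: the outer while-loop of Source B — emit omission markers and line slices per run.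
def pvEmit (lines : List String) (prevEnd : Int) (flat : List Int) : List String :=
  match flat with
  | [] => []
  | a :: rest =>
    let q := pvRunSplit a rest
    ((if a > prevEnd then
        ["// ... (lines " ++ PySem.Int.toStr (prevEnd + 1) ++ "-" ++ PySem.Int.toStr (a - 1) ++ " omitted) ..."]
      else []) ++ PySem.List.slice lines (some a) (some q.1))
      ++ pvEmit lines q.1 q.2
termination_by flat.length
decreasing_by
  have := pvRunSplit_length_le rest a
  simp only [List.length_cons]
  omega

def extract_spec_portion_alt (source_text : String) (max_lines : Int) : String :=
  let lines := (PySem.Str.split? source_text "\n").getD []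
  let n : Int := lines.length
  if n ≤ max_lines then source_text
  else
    let intervals : List (Int × Int) :=
      (PySem.List.enumerate lines).foldl (fun acc p =>
        if pvSpecKeywords.any (fun kw => PySem.Str.isIn kw (PySem.Str.strip (PySem.Str.lower p.2))) then
          acc ++ [(max 0 (p.1 - 5), min n (p.1 + 11))]
        else acc) [(0, min 20 n)]
    let intervals := intervals ++ [(max 0 (n - 5), n)]
    let st := intervals.tail.foldl (fun (st : List (Int × Int) × Int × Int) p =>
        if p.1 ≤ st.2.2 then
          (st.1, st.2.1, if p.2 > st.2.2 then p.2 else st.2.2)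
        else (st.1 ++ [(st.2.1, st.2.2)], p.1, p.2))
        ([], (intervals.headD (0, 0)).1, (intervals.headD (0, 0)).2)
    let merged := st.1 ++ [(st.2.1, st.2.2)]
    let flat := merged.foldl (fun acc q => acc ++ PySem.List.pyRange q.1 q.2) []
    let flat := if (flat.length : Int) > max_lines then PySem.List.slice flat none (some max_lines) else flat
    PySem.Str.join "\n" (pvEmit lines (-1) flat)

-- ===== PRECONDITION & SPEC =====
def Spec_extract_spec_portion (source_text : String) (max_lines : Int) (out : String) : Prop := out = extract_spec_portion_alt source_text max_lines
instance (source_text : String) (max_lines : Int) (out : String) : Decidable (Spec_extract_spec_portion source_text max_lines out) := by unfold Spec_extract_spec_portion; infer_instance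

-- ===== CLAIM (what is proved, stated in full; the proofs are below) =====
def Claim_equal_extract_spec_portion : Prop := ∀ (source_text : String) (max_lines : Int), Dom_extract_spec_portion source_text max_lines → Spec_extract_spec_portion source_text max_lines (extract_spec_portion source_text max_lines)


-- ===== LEMMAS AND PROOFS =====

-- the shared keyword test
def pvP (line : String) : Bool :=
  pvSpecKeywords.any (fun kw => PySem.Str.isIn kw (PySem.Str.strip (PySem.Str.lower line)))

-- the set of line indices covered by a list of half-open intervals
def pvCov (L : List (Int × Int)) (x : Int) : Prop := ∃ q ∈ L, q.1 ≤ x ∧ x < q.2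

theorem pvCov_append (L1 L2 : List (Int × Int)) (x : Int) :
    pvCov (L1 ++ L2) x ↔ pvCov L1 x ∨ pvCov L2 x := by
  simp [pvCov, or_and_right, exists_or]

theorem pvCov_cons (q : Int × Int) (L : List (Int × Int)) (x : Int) :
    pvCov (q :: L) x ↔ (q.1 ≤ x ∧ x < q.2) ∨ pvCov L x := by
  simp [pvCov, or_and_right, exists_or]

theorem pvCov_single (a b x : Int) : pvCov [(a, b)] x ↔ a ≤ x ∧ x < b := by
  simp [pvCov]

theorem pvCov_nil (x : Int) : pvCov [] x ↔ False := by
  simp [pvCov]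

theorem pvRange_nil {a b : Int} (h : b ≤ a) : PySem.List.pyRange a b = [] := by
  simp [PySem.List.pyRange]; omega

theorem pvRange_pairwise (a b : Int) : (PySem.List.pyRange a b).Pairwise (· < ·) := by
  by_cases h : a < b
  · rw [PySem.List.pyRange_one_cons h]
    refine List.Pairwise.cons ?_ (pvRange_pairwise (a + 1) b)
    intro x hx
    have := PySem.List.mem_pyRange_one.1 hx
    omega
  · rw [pvRange_nil (by omega)]; exact List.Pairwise.nil
termination_by (b - a).toNat
decreasing_by omega

-- flattening a list of intervals
theorem pv_mem_flatten (L : List (Int × Int)) (x : Int) :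
    x ∈ L.flatMap (fun q => PySem.List.pyRange q.1 q.2) ↔ pvCov L x := by
  simp [List.mem_flatMap, PySem.List.mem_pyRange_one, pvCov]

theorem pv_flatten_pairwise (L : List (Int × Int))
    (hsep : L.Pairwise (fun q r => q.2 ≤ r.1)) :
    (L.flatMap (fun q => PySem.List.pyRange q.1 q.2)).Pairwise (· < ·) := by
  rw [List.flatMap_def, List.pairwise_flatten]
  constructor
  · intro l hl
    obtain ⟨q, _, rfl⟩ := List.mem_map.1 hl
    exact pvRange_pairwise _ _
  · refine (List.pairwise_map).2 (hsep.imp ?_)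
    intro q r h x hx y hy
    have hx' := PySem.List.mem_pyRange_one.1 hx
    have hy' := PySem.List.mem_pyRange_one.1 hy
    omega

-- specification of Source B's merge loop
theorem pv_merge_spec :
    ∀ (ys m : List (Int × Int)) (ca cb : Int),
    ca < cb →
    (∀ q ∈ ys, q.1 < q.2) →
    (∀ q ∈ ys, ca ≤ q.1) →
    ys.Pairwise (fun q r => q.1 ≤ r.1) →
    (∀ q ∈ m, q.2 < ca) →
    m.Pairwise (fun q r => q.2 < r.1) →
    (∀ q ∈ m, q.1 < q.2) →
    ((ys.foldl (fun (st : List (Int × Int) × Int × Int) p =>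
        if p.1 ≤ st.2.2 then
          (st.1, st.2.1, if p.2 > st.2.2 then p.2 else st.2.2)
        else (st.1 ++ [(st.2.1, st.2.2)], p.1, p.2)) (m, ca, cb)).1 ++
      [((ys.foldl (fun (st : List (Int × Int) × Int × Int) p =>
        if p.1 ≤ st.2.2 then
          (st.1, st.2.1, if p.2 > st.2.2 then p.2 else st.2.2)
        else (st.1 ++ [(st.2.1, st.2.2)], p.1, p.2)) (m, ca, cb)).2.1,
        (ys.foldl (fun (st : List (Int × Int) × Int × Int) p =>
        if p.1 ≤ st.2.2 then
          (st.1, st.2.1, if p.2 > st.2.2 then p.2 else st.2.2)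
        else (st.1 ++ [(st.2.1, st.2.2)], p.1, p.2)) (m, ca, cb)).2.2)]).Pairwise (fun q r => q.2 < r.1)
    ∧ (∀ q ∈ (ys.foldl (fun (st : List (Int × Int) × Int × Int) p =>
        if p.1 ≤ st.2.2 then
          (st.1, st.2.1, if p.2 > st.2.2 then p.2 else st.2.2)
        else (st.1 ++ [(st.2.1, st.2.2)], p.1, p.2)) (m, ca, cb)).1 ++
      [((ys.foldl (fun (st : List (Int × Int) × Int × Int) p =>
        if p.1 ≤ st.2.2 then
          (st.1, st.2.1, if p.2 > st.2.2 then p.2 else st.2.2)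
        else (st.1 ++ [(st.2.1, st.2.2)], p.1, p.2)) (m, ca, cb)).2.1,
        (ys.foldl (fun (st : List (Int × Int) × Int × Int) p =>
        if p.1 ≤ st.2.2 then
          (st.1, st.2.1, if p.2 > st.2.2 then p.2 else st.2.2)
        else (st.1 ++ [(st.2.1, st.2.2)], p.1, p.2)) (m, ca, cb)).2.2)], q.1 < q.2)
    ∧ (∀ x : Int, pvCov ((ys.foldl (fun (st : List (Int × Int) × Int × Int) p =>
        if p.1 ≤ st.2.2 then
          (st.1, st.2.1, if p.2 > st.2.2 then p.2 else st.2.2)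
        else (st.1 ++ [(st.2.1, st.2.2)], p.1, p.2)) (m, ca, cb)).1 ++
      [((ys.foldl (fun (st : List (Int × Int) × Int × Int) p =>
        if p.1 ≤ st.2.2 then
          (st.1, st.2.1, if p.2 > st.2.2 then p.2 else st.2.2)
        else (st.1 ++ [(st.2.1, st.2.2)], p.1, p.2)) (m, ca, cb)).2.1,
        (ys.foldl (fun (st : List (Int × Int) × Int × Int) p =>
        if p.1 ≤ st.2.2 then
          (st.1, st.2.1, if p.2 > st.2.2 then p.2 else st.2.2)
        else (st.1 ++ [(st.2.1, st.2.2)], p.1, p.2)) (m, ca, cb)).2.2)]) x ↔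
        (pvCov (m ++ [(ca, cb)]) x ∨ pvCov ys x)) := by
  intro ys
  induction ys with
  | nil =>
    intro m ca cb hcacb _ _ _ hsep hpw hne
    refine ⟨?_, ?_, ?_⟩
    · rw [List.pairwise_append]
      exact ⟨hpw, List.pairwise_singleton _ _, by simpa using hsep⟩
    · intro q hq
      rcases List.mem_append.1 hq with h | h
      · exact hne _ h
      · simp only [List.mem_singleton] at h
        subst h
        exact hcacb
    · intro x; simp [pvCov]
  | cons q ys ih =>
    intro m ca cb hcacb hne hca hpw hsepm hpwm hnem
    simp only [List.foldl_cons]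
    by_cases hq : q.1 ≤ cb
    · simp only [if_pos hq]
      have h1 : ca < (if q.2 > cb then q.2 else cb) := by split <;> omega
      obtain ⟨A1, A2, A3⟩ := ih m ca _ h1
        (fun r hr => hne r (List.mem_cons_of_mem _ hr))
        (fun r hr => hca r (List.mem_cons_of_mem _ hr))
        (List.Pairwise.of_cons hpw)
        hsepm hpwm hnem
      refine ⟨A1, A2, ?_⟩
      intro x
      rw [A3]
      simp only [pvCov_append, pvCov_cons, pvCov_nil, or_false]
      have hq1 : ca ≤ q.1 := hca q List.mem_cons_self
      have hq2 : q.1 < q.2 := hne q List.mem_cons_self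
      have key : (ca ≤ x ∧ x < (if q.2 > cb then q.2 else cb)) ↔
          ((ca ≤ x ∧ x < cb) ∨ (q.1 ≤ x ∧ x < q.2)) := by
        split <;> omega
      rw [key]
      constructor
      · rintro ((h | (h | h)) | h)
        · exact Or.inl (Or.inl h)
        · exact Or.inl (Or.inr h)
        · exact Or.inr (Or.inl h)
        · exact Or.inr (Or.inr h)
      · rintro ((h | h) | (h | h))
        · exact Or.inl (Or.inl h)
        · exact Or.inl (Or.inr (Or.inl h))
        · exact Or.inl (Or.inr (Or.inr h))
        · exact Or.inr h
    · simp only [if_neg hq]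
      have hq2 : q.1 < q.2 := hne q List.mem_cons_self
      obtain ⟨A1, A2, A3⟩ := ih (m ++ [(ca, cb)]) q.1 q.2 hq2
        (fun r hr => hne r (List.mem_cons_of_mem _ hr))
        (fun r hr => List.rel_of_pairwise_cons hpw hr)
        (List.Pairwise.of_cons hpw)
        (by
          intro r hr
          rcases List.mem_append.1 hr with h | h
          · have := hsepm r h; omega
          · simp only [List.mem_singleton] at h
            subst h
            show cb < q.1
            omega)
        (by
          rw [List.pairwise_append]
          exact ⟨hpwm, List.pairwise_singleton _ _, by simpa using hsepm⟩)
        (by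
          intro r hr
          rcases List.mem_append.1 hr with h | h
          · exact hnem r h
          · simp only [List.mem_singleton] at h
            subst h
            exact hcacb)
      refine ⟨A1, A2, ?_⟩
      intro x
      rw [A3]
      simp only [pvCov_append, pvCov_cons, pvCov_nil, or_false]
      constructor
      · rintro (((h | h) | h) | h)
        · exact Or.inl (Or.inl h)
        · exact Or.inl (Or.inr h)
        · exact Or.inr (Or.inl h)
        · exact Or.inr (Or.inr h)
      · rintro ((h | h) | (h | h))
        · exact Or.inl (Or.inl (Or.inl h))
        · exact Or.inl (Or.inl (Or.inr h))
        · exact Or.inl (Or.inr h)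
        · exact Or.inr h

-- membership and nodup of A's keyword fold over the important-lines set
theorem pv_memA (n : Int) (l : List (Int × String)) (s : PySem.Set Int) (x : Int) :
    x ∈ l.foldl (fun s p =>
        if pvSpecKeywords.any (fun kw => PySem.Str.isIn kw (PySem.Str.strip (PySem.Str.lower p.2))) then
          (PySem.List.pyRange (max 0 (p.1 - 5)) (min n (p.1 + 11))).foldl PySem.Set.add s
        else s) s ↔
      x ∈ s ∨ ∃ p ∈ l, (pvSpecKeywords.any (fun kw => PySem.Str.isIn kw (PySem.Str.strip (PySem.Str.lower p.2)))) = true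
        ∧ max 0 (p.1 - 5) ≤ x ∧ x < min n (p.1 + 11) := by
  induction l generalizing s with
  | nil => simp
  | cons q l ih =>
    simp only [List.foldl_cons]
    rw [List.exists_mem_cons_iff]
    by_cases hq : (pvSpecKeywords.any (fun kw => PySem.Str.isIn kw (PySem.Str.strip (PySem.Str.lower q.2)))) = true
    · rw [if_pos hq]
      rw [ih]
      rw [show (PySem.List.pyRange (max 0 (q.1 - 5)) (min n (q.1 + 11))).foldl PySem.Set.add s
          = PySem.Set.update s (PySem.List.pyRange (max 0 (q.1 - 5)) (min n (q.1 + 11))) from rfl]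
      rw [PySem.Set.mem_update]
      simp only [PySem.List.mem_pyRange_one, hq, true_and]
      constructor
      · rintro ((h | h) | ⟨p, hp, hc⟩)
        · exact Or.inl h
        · exact Or.inr (Or.inl h)
        · exact Or.inr (Or.inr ⟨p, hp, hc⟩)
      · rintro (h | (h | ⟨p, hp, hc⟩))
        · exact Or.inl (Or.inl h)
        · exact Or.inl (Or.inr h)
        · exact Or.inr ⟨p, hp, hc⟩
    · rw [if_neg hq]
      rw [ih]
      constructor
      · rintro (h | ⟨p, hp, hc⟩)
        · exact Or.inl h
        · exact Or.inr (Or.inr ⟨p, hp, hc⟩)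
      · rintro (h | (⟨hc, _⟩ | ⟨p, hp, hc⟩))
        · exact Or.inl h
        · exact absurd hc hq
        · exact Or.inr ⟨p, hp, hc⟩

theorem pv_nodupA (n : Int) (l : List (Int × String)) (s : PySem.Set Int) (hs : s.Nodup) :
    (l.foldl (fun s p =>
        if pvSpecKeywords.any (fun kw => PySem.Str.isIn kw (PySem.Str.strip (PySem.Str.lower p.2))) then
          (PySem.List.pyRange (max 0 (p.1 - 5)) (min n (p.1 + 11))).foldl PySem.Set.add s
        else s) s).Nodup := by
  induction l generalizing s with
  | nil => exact hs
  | cons q l ih =>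
    simp only [List.foldl_cons]
    split
    · exact ih _ (PySem.Set.nodup_update _ _ hs)
    · exact ih _ hs


-- nonemptiness of Python's str.split result
theorem pv_go_ne_nil (sep : List Char) : ∀ (fuel : Nat) (l cur : List Char) (acc : List (List Char)),
    PySem.Chars.splitOn.go sep fuel l cur acc ≠ [] := by
  intro fuel
  induction fuel with
  | zero => intro l cur acc; simp [PySem.Chars.splitOn.go]
  | succ n ih =>
    intro l cur acc
    match l with
    | [] => simp [PySem.Chars.splitOn.go]
    | c :: rest =>
      rw [PySem.Chars.splitOn.go]
      split
      · exact ih _ _ _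
      · exact ih _ _ _

theorem pv_lines_ne_nil (s : String) : (PySem.Str.split? s "\n").getD [] ≠ [] := by
  have h : PySem.Chars.split? s.toList "\n".toList = some (PySem.Chars.splitOn s.toList "\n".toList) := by
    simp [PySem.Chars.split?]
  simp only [PySem.Str.split?, h, Option.map_some, Option.getD_some]
  simp only [ne_eq, List.map_eq_nil_iff]
  exact pv_go_ne_nil _ _ _ _ _

-- specification of Source B's inner run-splitting loop
theorem pv_runSplit_spec : ∀ (rest : List Int) (a : Int), (a :: rest).Pairwise (· < ·) →
    a < (pvRunSplit a rest).1 ∧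
    a :: rest = PySem.List.pyRange a (pvRunSplit a rest).1 ++ (pvRunSplit a rest).2 ∧
    (pvRunSplit a rest).2.Pairwise (· < ·) ∧
    (∀ x ∈ (pvRunSplit a rest).2, (pvRunSplit a rest).1 < x) := by
  intro rest
  induction rest with
  | nil =>
    intro a _
    refine ⟨by simp [pvRunSplit], ?_, by simp [pvRunSplit], by simp [pvRunSplit]⟩
    simp only [pvRunSplit]
    rw [PySem.List.pyRange_one_cons (by omega), pvRange_nil (by omega)]
    simp
  | cons x xs ih =>
    intro a hpw
    have hax : a < x := List.rel_of_pairwise_cons hpw List.mem_cons_self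
    by_cases hx : x = a + 1
    · have h1 : pvRunSplit a (x :: xs) = pvRunSplit x xs := by
        simp [pvRunSplit, hx]
      obtain ⟨B1, B2, B3, B4⟩ := ih x (List.Pairwise.of_cons hpw)
      rw [h1]
      refine ⟨by omega, ?_, B3, B4⟩
      rw [PySem.List.pyRange_one_cons (by omega : a < (pvRunSplit x xs).1), List.cons_append, ← hx, ← B2]
    · have h1 : pvRunSplit a (x :: xs) = (a + 1, x :: xs) := by
        simp [pvRunSplit, hx]
      rw [h1]
      refine ⟨by omega, ?_, List.Pairwise.of_cons hpw, ?_⟩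
      · rw [PySem.List.pyRange_one_cons (by omega), pvRange_nil (by omega)]
        simp
      · intro y hy
        rcases List.mem_cons.1 hy with rfl | hy
        · omega
        · have h2 := List.rel_of_pairwise_cons (List.Pairwise.of_cons hpw) hy
          omega

-- A's rebuild loop over one consecutive run emits no markers after the first element
theorem pv_foldl_run (lines : List String) : ∀ (k : Nat) (a : Int) (acc : List String),
    (PySem.List.pyRange a (a + k)).foldl (fun (st : List String × Int) i =>
        ((if i > st.2 + 1 then
            st.1 ++ ["// ... (lines " ++ PySem.Int.toStr (st.2 + 2) ++ "-" ++ PySem.Int.toStr (i - 1) ++ " omitted) ..."]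
          else st.1) ++ [PySem.List.pyGetD lines i ""], i)) (acc, a - 1)
    = (acc ++ (PySem.List.pyRange a (a + k)).map (fun i => PySem.List.pyGetD lines i ""), a + k - 1) := by
  intro k
  induction k with
  | zero =>
    intro a acc
    rw [pvRange_nil (by simp)]
    simp
  | succ k ih =>
    intro a acc
    have hcons : PySem.List.pyRange a (a + ((k : Int) + 1)) = a :: PySem.List.pyRange (a + 1) (a + ((k : Int) + 1)) :=
      PySem.List.pyRange_one_cons (by omega)
    push_cast
    rw [hcons, List.foldl_cons, List.map_cons]
    rw [if_neg (by omega)]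
    have hshift : a + ((k : Int) + 1) = (a + 1) + (k : Int) := by ring
    rw [hshift]
    have := ih (a + 1) (acc ++ [PySem.List.pyGetD lines a ""])
    rw [show (a + 1) - 1 = a from by ring] at this
    rw [this]
    simp [List.append_assoc]

-- lines[a:b] is the per-index reads of A's rebuild loop
theorem pv_take_drop (lines : List String) : ∀ (k a' : Nat), a' + k ≤ lines.length →
    (lines.drop a').take k = (PySem.List.pyRange (a' : Int) ((a' : Int) + (k : Int))).map
      (fun i => PySem.List.pyGetD lines i "") := by
  intro k
  induction k with
  | zero => intro a' _; rw [pvRange_nil (by simp)]; simp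
  | succ k ih =>
    intro a' h
    have ha : a' < lines.length := by omega
    have hcons : PySem.List.pyRange (a' : Int) ((a' : Int) + ((k : Nat) + 1 : Nat)) =
        (a' : Int) :: PySem.List.pyRange ((a' : Int) + 1) ((a' : Int) + ((k : Nat) + 1 : Nat)) :=
      PySem.List.pyRange_one_cons (by push_cast; omega)
    rw [hcons, List.map_cons]
    rw [List.drop_eq_getElem_cons ha]
    rw [List.take_succ_cons]
    congr 1
    · rw [PySem.List.pyGetD_natCast]
      exact (List.getD_eq_getElem lines "" ha).symm
    · have h1 : ((a' : Int) + 1) = ((a' + 1 : Nat) : Int) := by push_cast; ring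
      have h2 : ((a' : Int) + ((k : Nat) + 1 : Nat)) = ((a' + 1 : Nat) : Int) + (k : Int) := by push_cast; ring
      rw [h1, h2, ← ih (a' + 1) (by omega)]

theorem pv_slice_eq_map (lines : List String) (a b : Int) (h0 : 0 ≤ a) (hab : a ≤ b)
    (hb : b ≤ (lines.length : Int)) :
    PySem.List.slice lines (some a) (some b) = (PySem.List.pyRange a b).map
      (fun i => PySem.List.pyGetD lines i "") := by
  obtain ⟨a', rfl⟩ : ∃ a' : Nat, a = (a' : Int) := ⟨a.toNat, by omega⟩
  obtain ⟨k, hk⟩ : ∃ k : Nat, b = (a' : Int) + (k : Int) := ⟨(b - a').toNat, by omega⟩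
  subst hk
  rw [PySem.List.slice_natCast_add]
  exact pv_take_drop lines k a' (by omega)

-- A's rebuild loop equals B's run emission on any strictly increasing list of valid indices
theorem pv_emit_eq (lines : List String) : ∀ (k : Nat) (S : List Int), S.length ≤ k →
    S.Pairwise (· < ·) → (∀ x ∈ S, 0 ≤ x ∧ x < (lines.length : Int)) →
    ∀ (acc : List String) (p : Int),
    (S.foldl (fun (st : List String × Int) i =>
        ((if i > st.2 + 1 then
            st.1 ++ ["// ... (lines " ++ PySem.Int.toStr (st.2 + 2) ++ "-" ++ PySem.Int.toStr (i - 1) ++ " omitted) ..."]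
          else st.1) ++ [PySem.List.pyGetD lines i ""], i)) (acc, p)).1
    = acc ++ pvEmit lines (p + 1) S := by
  intro k
  induction k with
  | zero =>
    intro S hS _ _ acc p
    have h : S = [] := List.eq_nil_of_length_eq_zero (by omega)
    subst h
    simp [pvEmit]
  | succ k ih =>
    intro S hS hpw hbd acc p
    match S with
    | [] => simp [pvEmit]
    | a :: rest =>
      obtain ⟨hb1, hb2, hb3, hb4⟩ := pv_runSplit_spec rest a hpw
      rw [show pvEmit lines (p + 1) (a :: rest) =
          ((if a > p + 1 then
              ["// ... (lines " ++ PySem.Int.toStr (p + 1 + 1) ++ "-" ++ PySem.Int.toStr (a - 1) ++ " omitted) ..."]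
            else []) ++ PySem.List.slice lines (some a) (some (pvRunSplit a rest).1))
            ++ pvEmit lines (pvRunSplit a rest).1 (pvRunSplit a rest).2 from by
        rw [pvEmit]]
      have h0 : (0 : Int) ≤ a := (hbd a List.mem_cons_self).1
      have hbn : (pvRunSplit a rest).1 ≤ (lines.length : Int) := by
        have hmem : (pvRunSplit a rest).1 - 1 ∈ a :: rest := by
          rw [hb2]
          exact List.mem_append.2 (Or.inl (PySem.List.mem_pyRange_one.2 (by omega)))
        have := hbd _ hmem
        omega
      rw [pv_slice_eq_map lines a (pvRunSplit a rest).1 h0 (by omega) hbn]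
      rw [show p + 1 + 1 = p + 2 from by ring]
      rw [hb2, List.foldl_append]
      obtain ⟨k', hk'⟩ : ∃ k' : Nat, (pvRunSplit a rest).1 = (a + 1) + (k' : Int) :=
        ⟨((pvRunSplit a rest).1 - (a + 1)).toNat, by omega⟩
      have hlenR : (pvRunSplit a rest).2.length ≤ k := by
        have := pvRunSplit_length_le rest a
        simp only [List.length_cons] at hS
        omega
      have hbdR : ∀ x ∈ (pvRunSplit a rest).2, 0 ≤ x ∧ x < (lines.length : Int) := by
        intro x hx
        exact hbd x (by rw [hb2]; exact List.mem_append.2 (Or.inr hx))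
      rw [hk']
      rw [PySem.List.pyRange_one_cons (by omega : a < a + 1 + (k' : Int))]
      simp only [List.foldl_cons, List.map_cons]
      have hrun := pv_foldl_run lines k' (a + 1)
        ((if a > p + 1 then
            acc ++ ["// ... (lines " ++ PySem.Int.toStr (p + 2) ++ "-" ++ PySem.Int.toStr (a - 1) ++ " omitted) ..."]
          else acc) ++ [PySem.List.pyGetD lines a ""])
      rw [show (a + 1) - 1 = a from by ring] at hrun
      rw [hrun]
      rw [ih (pvRunSplit a rest).2 hlenR hb3 hbdR]
      rw [show (a + 1) + (k' : Int) - 1 + 1 = a + 1 + (k' : Int) from by ring]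
      by_cases hM : a > p + 1 <;> simp [hM, List.append_assoc]

theorem pv_cov_map_filter (c : (Int × String) → Bool) (f : (Int × String) → (Int × Int))
    (l : List (Int × String)) (x : Int) :
    pvCov ((l.filter c).map f) x ↔ ∃ p ∈ l, c p = true ∧ (f p).1 ≤ x ∧ x < (f p).2 := by
  unfold pvCov
  constructor
  · rintro ⟨q, hq, h⟩
    obtain ⟨p, hp, rfl⟩ := List.mem_map.1 hq
    obtain ⟨hpl, hpc⟩ := List.mem_filter.1 hp
    exact ⟨p, hpl, hpc, h⟩
  · rintro ⟨p, hp, hc, h⟩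
    exact ⟨f p, List.mem_map.2 ⟨p, List.mem_filter.2 ⟨hp, hc⟩, rfl⟩, h⟩

theorem pv_slice_to_take {α : Type} (xs : List α) (b : Int) :
    PySem.List.slice xs none (some b) = xs.take (PySem.List.clampIdx xs.length b) := by
  simp [PySem.List.slice]


theorem pv_mem_foldl_add (s : PySem.Set Int) (xs : List Int) (x : Int) :
    x ∈ xs.foldl PySem.Set.add s ↔ x ∈ s ∨ x ∈ xs := by
  rw [show xs.foldl PySem.Set.add s = PySem.Set.update s xs from rfl]
  exact PySem.Set.mem_update s xs x

theorem pv_main (source_text : String) (max_lines : Int) :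
    extract_spec_portion source_text max_lines = extract_spec_portion_alt source_text max_lines := by
  have hnil := pv_lines_ne_nil source_text
  simp only [extract_spec_portion, extract_spec_portion_alt]
  by_cases hle : (((PySem.Str.split? source_text "\n").getD []).length : Int) ≤ max_lines
  · rw [if_pos hle, if_pos hle]
  · rw [if_neg hle, if_neg hle]
    set lines : List String := (PySem.Str.split? source_text "\n").getD [] with hldef
    set nn : Int := (lines.length : Int) with hnn
    have hn1 : 0 < lines.length := List.length_pos_of_ne_nil hnil
    have hn1' : 1 ≤ nn := by rw [hnn]; exact_mod_cast hn1
    set K : List (Int × Int) := ((PySem.List.enumerate lines).filter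
        (fun pr => pvSpecKeywords.any (fun kw => PySem.Str.isIn kw (PySem.Str.strip (PySem.Str.lower pr.2))))).map
        (fun pr => (max 0 (pr.1 - 5), min nn (pr.1 + 11))) with hK
    set iv : List (Int × Int) := List.foldl (fun acc p =>
        if pvSpecKeywords.any (fun kw => PySem.Str.isIn kw (PySem.Str.strip (PySem.Str.lower p.2))) then
          acc ++ [(max 0 (p.1 - 5), min nn (p.1 + 11))]
        else acc) [(0, min 20 nn)] (PySem.List.enumerate lines) ++ [(max 0 (nn - 5), nn)] with hiv
    set st : List (Int × Int) × Int × Int := List.foldl (fun (st : List (Int × Int) × Int × Int) p =>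
        if p.1 ≤ st.2.2 then
          (st.1, st.2.1, if p.2 > st.2.2 then p.2 else st.2.2)
        else (st.1 ++ [(st.2.1, st.2.2)], p.1, p.2))
        ([], (iv.headD (0, 0)).1, (iv.headD (0, 0)).2) iv.tail with hst
    set M : List (Int × Int) := st.1 ++ [(st.2.1, st.2.2)] with hM
    set F : List Int := List.foldl (fun acc q => acc ++ PySem.List.pyRange q.1 q.2) [] M with hF
    set SetE : PySem.Set Int := List.foldl PySem.Set.add
        (List.foldl PySem.Set.add
          (List.foldl (fun s p =>
            if pvSpecKeywords.any (fun kw => PySem.Str.isIn kw (PySem.Str.strip (PySem.Str.lower p.2))) then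
              List.foldl PySem.Set.add s (PySem.List.pyRange (max 0 (p.1 - 5)) (min nn (p.1 + 11)))
            else s) PySem.Set.empty (PySem.List.enumerate lines))
          (PySem.List.pyRange 0 (min 20 nn)))
        (PySem.List.pyRange (max 0 (nn - 5)) nn) with hSetE
    have hshape : iv = (0, min 20 nn) :: (K ++ [(max 0 (nn - 5), nn)]) := by
      rw [hiv, PySem.List.foldl_append_if, ← hK, List.append_assoc, List.singleton_append]
    have hKmem : ∀ q ∈ K, ∃ i : Int, 0 ≤ i ∧ i < nn ∧ q = (max 0 (i - 5), min nn (i + 11)) := by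
      intro q hq
      rw [hK] at hq
      obtain ⟨p, hp, rfl⟩ := List.mem_map.1 hq
      obtain ⟨hpl, _⟩ := List.mem_filter.1 hp
      obtain ⟨k, hk, rfl⟩ := (PySem.List.mem_enumerate_iff lines 0 p).1 hpl
      exact ⟨0 + (k : Int), by omega, by rw [hnn]; omega, rfl⟩
    have hysne : ∀ q ∈ K ++ [(max 0 (nn - 5), nn)], q.1 < q.2 := by
      intro q hq
      rcases List.mem_append.1 hq with h | h
      · obtain ⟨i, h0, h1, rfl⟩ := hKmem q h
        show max 0 (i - 5) < min nn (i + 11)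
        omega
      · simp only [List.mem_singleton] at h
        subst h
        show max 0 (nn - 5) < nn
        omega
    have hysca : ∀ q ∈ K ++ [(max 0 (nn - 5), nn)], (0 : Int) ≤ q.1 := by
      intro q hq
      rcases List.mem_append.1 hq with h | h
      · obtain ⟨i, h0, h1, rfl⟩ := hKmem q h
        show (0 : Int) ≤ max 0 (i - 5)
        omega
      · simp only [List.mem_singleton] at h
        subst h
        show (0 : Int) ≤ max 0 (nn - 5)
        omega
    have hyspw : (K ++ [(max 0 (nn - 5), nn)]).Pairwise (fun q r => q.1 ≤ r.1) := by
      rw [List.pairwise_append]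
      refine ⟨?_, List.pairwise_singleton _ _, ?_⟩
      · rw [hK, List.pairwise_map]
        refine List.Pairwise.imp ?_ ((PySem.List.pairwise_lt_enumerate lines 0).filter _)
        intro a b h
        show max 0 (a.1 - 5) ≤ max 0 (b.1 - 5)
        omega
      · intro a ha b hb
        simp only [List.mem_singleton] at hb
        subst hb
        obtain ⟨i, h0, h1, rfl⟩ := hKmem a ha
        show max 0 (i - 5) ≤ max 0 (nn - 5)
        omega
    obtain ⟨A1, A2, A3⟩ := pv_merge_spec (K ++ [(max 0 (nn - 5), nn)]) [] 0 (min 20 nn)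
      (by omega) hysne hysca hyspw (by simp) (by simp) (by simp)
    have hst2 : st = List.foldl (fun (st : List (Int × Int) × Int × Int) p =>
        if p.1 ≤ st.2.2 then
          (st.1, st.2.1, if p.2 > st.2.2 then p.2 else st.2.2)
        else (st.1 ++ [(st.2.1, st.2.2)], p.1, p.2))
        ([], 0, min 20 nn) (K ++ [(max 0 (nn - 5), nn)]) := by
      rw [hst, hshape]
      simp only [List.tail_cons, List.headD_cons]
    rw [← hst2] at A1 A2 A3
    rw [← hM] at A1 A2 A3
    have hFflat : F = M.flatMap (fun q => PySem.List.pyRange q.1 q.2) := by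
      rw [hF, PySem.List.foldl_append_eq_flatMap, List.nil_append]
    have hmemF : ∀ x : Int, x ∈ F ↔ pvCov M x := by
      intro x; rw [hFflat]; exact pv_mem_flatten M x
    have hpwF : F.Pairwise (· < ·) := by
      rw [hFflat]
      exact pv_flatten_pairwise M (A1.imp (fun h => le_of_lt h))
    have hcovK : ∀ x : Int, pvCov K x ↔ ∃ p ∈ PySem.List.enumerate lines,
        (pvSpecKeywords.any (fun kw => PySem.Str.isIn kw (PySem.Str.strip (PySem.Str.lower p.2)))) = true
          ∧ max 0 (p.1 - 5) ≤ x ∧ x < min nn (p.1 + 11) := by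
      intro x
      rw [hK, pv_cov_map_filter]
    have hcovM : ∀ x : Int, pvCov M x ↔ (0 ≤ x ∧ x < min 20 nn) ∨
        ((∃ p ∈ PySem.List.enumerate lines,
          (pvSpecKeywords.any (fun kw => PySem.Str.isIn kw (PySem.Str.strip (PySem.Str.lower p.2)))) = true
            ∧ max 0 (p.1 - 5) ≤ x ∧ x < min nn (p.1 + 11)) ∨ (max 0 (nn - 5) ≤ x ∧ x < nn)) := by
      intro x
      rw [A3, List.nil_append, pvCov_single, pvCov_append, pvCov_single, hcovK]
    have hmemS : ∀ x : Int, x ∈ SetE ↔ ((∃ p ∈ PySem.List.enumerate lines,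
        (pvSpecKeywords.any (fun kw => PySem.Str.isIn kw (PySem.Str.strip (PySem.Str.lower p.2)))) = true
          ∧ max 0 (p.1 - 5) ≤ x ∧ x < min nn (p.1 + 11)) ∨ (0 ≤ x ∧ x < min 20 nn)) ∨
        (max 0 (nn - 5) ≤ x ∧ x < nn) := by
      intro x
      rw [hSetE, pv_mem_foldl_add, pv_mem_foldl_add, pv_memA]
      have hemp : x ∈ (PySem.Set.empty : PySem.Set Int) ↔ False := by
        simp [PySem.Set.empty]
      rw [hemp, false_or]
      simp only [PySem.List.mem_pyRange_one]
    have hnodupF : F.Nodup := hpwF.imp (fun h => ne_of_lt h)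
    have hnodupS : SetE.Nodup := by
      rw [hSetE]
      exact PySem.Set.nodup_update _ _ (PySem.Set.nodup_update _ _ (pv_nodupA nn _ _ List.nodup_nil))
    have hmemEq : ∀ x : Int, x ∈ F ↔ x ∈ SetE := by
      intro x
      rw [hmemF x, hcovM x, hmemS x]
      constructor
      · rintro (h | h | h)
        · exact Or.inl (Or.inr h)
        · exact Or.inl (Or.inl h)
        · exact Or.inr h
      · rintro ((h | h) | h)
        · exact Or.inr (Or.inl h)
        · exact Or.inl h
        · exact Or.inr (Or.inr h)
    have hperm : F.Perm SetE := (List.perm_ext_iff_of_nodup hnodupF hnodupS).2 hmemEq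
    have hsorted : PySem.List.sorted SetE (fun x => x) = F :=
      PySem.List.sorted_eq_of_perm_of_pairwise_lt SetE F _ hperm hpwF
    rw [hsorted]
    have hbdF : ∀ x ∈ F, 0 ≤ x ∧ x < nn := by
      intro x hx
      rcases (hcovM x).1 ((hmemF x).1 hx) with h | h | h
      · omega
      · obtain ⟨p, _, _, h2⟩ := h
        omega
      · omega
    set S : List Int := if (F.length : Int) > max_lines then PySem.List.slice F none (some max_lines) else F with hS
    have hpwS : S.Pairwise (· < ·) := by
      rw [hS]
      split
      · rw [pv_slice_to_take]
        exact hpwF.sublist (List.take_sublist _ _)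
      · exact hpwF
    have hbdS : ∀ x ∈ S, 0 ≤ x ∧ x < (lines.length : Int) := by
      intro x hx
      rw [← hnn]
      rw [hS] at hx
      refine hbdF x ?_
      split at hx
      · exact PySem.List.mem_of_mem_slice _ _ _ hx
      · exact hx
    rw [pv_emit_eq lines S.length S le_rfl hpwS hbdS [] (-2)]
    rw [List.nil_append, show (-2 : Int) + 1 = -1 from by norm_num]



-- ===== VERDICT (by name: the statement is the Claim_ definition above) =====
theorem extract_spec_portion_spec : Claim_equal_extract_spec_portion := by
  intro source_text max_lines _
  exact pv_main source_text max_lines
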